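-- pv_equiv track=rewrite | github.com/marekjm/pake | pake/transactions/compiler/joiner.py | _joinequals
-- ===== SOURCE A (Python) =====
-- def _joinequals(tokens):
--     """Joins various operators that consist of some grammar character and equality sign.
--     """
--     joined = []
--     i = 0
--     source = tokens
--     while i < len(tokens):
--         line, token = tokens[i]
--         if token in ['=', '!', '+', '-', '*', '/', '^'] and i < len(tokens)-1 and tokens[i+1][1] == '=':
--             token = '{0}='.format(token)
--             i += 1
--         i += 1
--         joined.append((line, token))
--     return joined
-- ===== SOURCE B (Python) =====
-- def _joinequals(tokens):
--     """Joins various operators that consist of some grammar character and equality sign."""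
--     joined = []
--     ops = ('=', '!', '+', '-', '*', '/', '^')
--     for line, token in tokens:
--         if token == '=' and joined and joined[-1][1] in ops:
--             pl, pt = joined[-1]
--             joined[-1] = (pl, pt + '=')
--         else:
--             joined.append((line, token))
--     return joined
-- ===== Notes on version B (the rewrite author's own statement) =====
-- stated objective: alternative
-- what changed: Replaces A's index-based look-ahead loop (peek at tokens[i+1] and skip it) with a single forward fold that merges backward: when the current token is '=' and the last emitted token is an operator, the last emitted token is rewritten in place to op+'='; merged two-character tokens are never operators, so the greedy left-to-right pairing is preserved.
import Mathlib
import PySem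

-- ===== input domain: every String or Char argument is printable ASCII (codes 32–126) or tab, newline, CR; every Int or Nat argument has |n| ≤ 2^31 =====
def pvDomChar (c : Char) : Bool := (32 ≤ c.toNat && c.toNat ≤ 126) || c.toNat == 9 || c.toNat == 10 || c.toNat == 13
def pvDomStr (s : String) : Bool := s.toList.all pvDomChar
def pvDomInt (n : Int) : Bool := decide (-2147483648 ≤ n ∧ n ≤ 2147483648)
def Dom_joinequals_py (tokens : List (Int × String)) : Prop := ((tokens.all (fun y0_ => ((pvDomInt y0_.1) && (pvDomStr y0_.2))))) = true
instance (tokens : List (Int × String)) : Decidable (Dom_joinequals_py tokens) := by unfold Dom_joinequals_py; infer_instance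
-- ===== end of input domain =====

-- B replaces A's look-ahead index loop with a forward fold that merges a '=' backward into the last emitted token (alternative decomposition, same cost).
-- ===== PORT A =====
-- A: index loop over tokens, peeking at tokens[i+1]; written as the obvious
-- recursion on the remaining suffix (consume two tokens when merging, else one).
def pvOps : List String := ["=", "!", "+", "-", "*", "/", "^"]

def joinequals_py (tokens : List (Int × String)) : List (Int × String) :=
  match tokens with
  | [] => []
  | (line, token) :: rest =>
    if token ∈ pvOps ∧ rest.head?.map Prod.snd = some "=" then
      (line, token ++ "=") :: joinequals_py rest.tail
    else
      (line, token) :: joinequals_py rest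
termination_by tokens.length
decreasing_by
  · simp only [List.length_cons]
    cases rest <;> simp
  · simp

-- ===== PORT B =====
-- B: one forward fold; a '=' merges backward into the previously emitted token.
def pvStepB (acc : List (Int × String)) (p : Int × String) : List (Int × String) :=
  if p.2 = "=" then
    match acc.getLast? with
    | some q => if q.2 ∈ pvOps then acc.dropLast ++ [(q.1, q.2 ++ "=")] else acc ++ [p]
    | none => acc ++ [p]
  else acc ++ [p]

def joinequals_py_alt (tokens : List (Int × String)) : List (Int × String) :=
  tokens.foldl pvStepB []

-- ===== PRECONDITION & SPEC =====
def Spec_joinequals_py (tokens : List (Int × String)) (out : List (Int × String)) : Prop := out = joinequals_py_alt tokens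
instance (tokens : List (Int × String)) (out : List (Int × String)) : Decidable (Spec_joinequals_py tokens out) := by unfold Spec_joinequals_py; infer_instance

-- ===== CLAIM (what is proved, stated in full; the proofs are below) =====
def Claim_equal_joinequals_py : Prop := ∀ (tokens : List (Int × String)), Dom_joinequals_py tokens → Spec_joinequals_py tokens (joinequals_py tokens)

-- ===== LEMMAS AND PROOFS =====

-- a merged token (op ++ "=") is two characters long, hence never an operator
lemma pv_merged_not_op (t : String) (ht : t ∈ pvOps) : t ++ "=" ∉ pvOps := by
  fin_cases ht <;> decide

-- key invariant: folding B over l extends acc by A's output, provided acc's last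
-- element is not an operator whenever l starts with "=" (so no backward merge fires
-- across the boundary).
lemma pv_key : ∀ (n : Nat) (l acc : List (Int × String)), l.length ≤ n →
    (∀ p, l.head? = some p → p.2 = "=" → ∀ q, acc.getLast? = some q → q.2 ∉ pvOps) →
    l.foldl pvStepB acc = acc ++ joinequals_py l := by
  intro n
  induction n with
  | zero =>
    intro l acc hl _
    have : l = [] := List.eq_nil_of_length_eq_zero (Nat.le_zero.mp hl)
    subst this; simp [joinequals_py]
  | succ n ih =>
    intro l acc hl hg
    match l with
    | [] => simp [joinequals_py]
    | (line, token) :: rest =>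
      have hstep : pvStepB acc (line, token) = acc ++ [(line, token)] := by
        unfold pvStepB
        by_cases he : token = "="
        · simp only [he]
          match hq : acc.getLast? with
          | none => rfl
          | some q =>
            have : q.2 ∉ pvOps := hg (line, token) rfl he q hq
            simp [this]
        · simp [he]
      by_cases hc : token ∈ pvOps ∧ rest.head?.map Prod.snd = some "="
      · obtain ⟨hop, hnext⟩ := hc
        match rest with
        | [] => simp at hnext
        | (l2, t2) :: rest' =>
          have ht2 : t2 = "=" := by simpa using hnext
          subst ht2
          have hstep2 : pvStepB (acc ++ [(line, token)]) (l2, "=") =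
              acc ++ [(line, token ++ "=")] := by
            unfold pvStepB
            simp [hop]
          have hrest' : rest'.length ≤ n := by
            simp only [List.length_cons] at hl; omega
          have hg' : ∀ p, rest'.head? = some p → p.2 = "=" →
              ∀ q, (acc ++ [(line, token ++ "=")]).getLast? = some q → q.2 ∉ pvOps := by
            intro p _ _ q hq
            rw [List.getLast?_concat] at hq
            cases hq
            exact pv_merged_not_op token hop
          calc ((line, token) :: (l2, "=") :: rest').foldl pvStepB acc
              = rest'.foldl pvStepB (acc ++ [(line, token ++ "=")]) := by
                simp only [List.foldl_cons, hstep, hstep2]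
            _ = acc ++ [(line, token ++ "=")] ++ joinequals_py rest' := ih rest' _ hrest' hg'
            _ = acc ++ joinequals_py ((line, token) :: (l2, "=") :: rest') := by
                rw [joinequals_py]
                simp [hop]
      · have hrest : rest.length ≤ n := by
          simp only [List.length_cons] at hl; omega
        have hg' : ∀ p, rest.head? = some p → p.2 = "=" →
            ∀ q, (acc ++ [(line, token)]).getLast? = some q → q.2 ∉ pvOps := by
          intro p hp hpe q hq
          rw [List.getLast?_concat] at hq
          cases hq
          intro hop
          exact hc ⟨hop, by rw [hp]; simp [hpe]⟩
        calc ((line, token) :: rest).foldl pvStepB acc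
            = rest.foldl pvStepB (acc ++ [(line, token)]) := by
              simp only [List.foldl_cons, hstep]
          _ = acc ++ [(line, token)] ++ joinequals_py rest := ih rest _ hrest hg'
          _ = acc ++ joinequals_py ((line, token) :: rest) := by
              rw [joinequals_py, if_neg hc]
              simp

-- ===== VERDICT (by name: the statement is the Claim_ definition above) =====
theorem joinequals_py_spec : Claim_equal_joinequals_py := by
  intro tokens _
  unfold Spec_joinequals_py joinequals_py_alt
  have := pv_key tokens.length tokens [] le_rfl (by intro p _ _ q hq; simp at hq)
  simp [this]
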